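-- pv_equiv track=rewrite | github.com/lewisthomson1989-glitch/Learning | python_dev/AdventOfCode/2015/Day01/main.py | part1
-- ===== SOURCE A (Python) =====
-- def part1(contents):
--     floor = 0
--
--     for char in contents:
--
--         if char == "(":
--             floor += 1
--
--         if char == ")":
--             floor -= 1
--
--     return floor
-- ===== SOURCE B (Python) =====
-- def part1(contents):
--     return contents.count("(") - contents.count(")")
-- ===== Notes on version B (the rewrite author's own statement) =====
-- stated objective: simpler
-- what changed: Replaced the explicit character loop with its conditional accumulator by two independent whole-string substring counts (via str.count) subtracted in closed form.
import Mathlib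
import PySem

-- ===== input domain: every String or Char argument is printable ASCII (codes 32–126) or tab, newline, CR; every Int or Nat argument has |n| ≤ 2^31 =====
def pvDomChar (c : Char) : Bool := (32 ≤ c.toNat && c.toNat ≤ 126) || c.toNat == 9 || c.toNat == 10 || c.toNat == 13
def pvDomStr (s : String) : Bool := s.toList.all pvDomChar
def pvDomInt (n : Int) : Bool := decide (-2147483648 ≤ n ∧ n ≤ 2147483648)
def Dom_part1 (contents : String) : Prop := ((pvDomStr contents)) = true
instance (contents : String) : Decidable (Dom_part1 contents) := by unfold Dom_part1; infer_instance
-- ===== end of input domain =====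

-- B replaces A's single accumulator loop by two substring counts subtracted (simpler closed form).

-- ===== PORT A =====
def part1 (contents : String) : Int :=
  contents.toList.foldl
    (fun floor char =>
      let floor := if char == '(' then floor + 1 else floor
      if char == ')' then floor - 1 else floor)
    0

-- ===== PORT B =====
def part1_alt (contents : String) : Int :=
  (PySem.Str.count contents "(" : Int) - (PySem.Str.count contents ")" : Int)

-- ===== PRECONDITION & SPEC =====
def Spec_part1 (contents : String) (out : Int) : Prop := out = part1_alt contents
instance (contents : String) (out : Int) : Decidable (Spec_part1 contents out) := by unfold Spec_part1; infer_instance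

-- ===== CLAIM (what is proved, stated in full; the proofs are below) =====
def Claim_equal_part1 : Prop := ∀ (contents : String), Dom_part1 contents → Spec_part1 contents (part1 contents)

-- ===== LEMMAS AND PROOFS =====

theorem countGo_single (c : Char) (l : List Char) (fuel acc : Nat) (h : l.length ≤ fuel) :
    PySem.Chars.count.go [c] fuel l acc = acc + l.count c := by
  induction l generalizing fuel acc with
  | nil => cases fuel <;> simp [PySem.Chars.count.go]
  | cons x t ih =>
    cases fuel with
    | zero => simp at h
    | succ fuel =>
      simp only [List.length_cons, Nat.succ_le_succ_iff] at h
      by_cases hx : x = c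
      · subst hx
        rw [show PySem.Chars.count.go [x] (fuel + 1) (x :: t) acc
              = PySem.Chars.count.go [x] fuel t (acc + 1) by
            simp [PySem.Chars.count.go, List.isPrefixOf]]
        rw [ih fuel (acc + 1) h]
        simp
        omega
      · rw [show PySem.Chars.count.go [c] (fuel + 1) (x :: t) acc
              = PySem.Chars.count.go [c] fuel t acc by
            simp [PySem.Chars.count.go, List.isPrefixOf]
            intro hc; exact absurd hc.symm hx]
        rw [ih fuel acc h]
        simp [hx]

theorem count_single (c : Char) (l : List Char) :
    PySem.Chars.count l [c] = l.count c := by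
  simp only [PySem.Chars.count, List.isEmpty, if_false, Bool.false_eq_true]
  rw [countGo_single c l l.length 0 (le_refl _)]
  simp

theorem foldl_paren (l : List Char) (a : Int) :
    l.foldl
      (fun floor char =>
        let floor := if char == '(' then floor + 1 else floor
        if char == ')' then floor - 1 else floor)
      a = a + (l.count '(' : Int) - (l.count ')' : Int) := by
  induction l generalizing a with
  | nil => simp
  | cons x t ih =>
    simp only [List.foldl_cons, ih, List.count_cons]
    by_cases h1 : x = '(' <;> by_cases h2 : x = ')' <;>
      simp [h1, h2] <;> omega

-- ===== VERDICT (by name: the statement is the Claim_ definition above) =====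
theorem part1_spec : Claim_equal_part1 := by
  intro contents _
  unfold Spec_part1 part1 part1_alt
  rw [PySem.Str.count_eq, PySem.Str.count_eq, foldl_paren]
  simp [count_single]
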